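-- pv_equiv track=rewrite | github.com/LimSeongHwan/algorithms | BJ_1145.py | solution
-- ===== SOURCE A (Python) =====
-- def solution(numbers):
--     min_num = min(numbers)
--
--     while True:
--         cnt = 0
--
--         for num in numbers:
--             if (min_num % num) == 0:
--                 cnt += 1
--
--                 if cnt == 3:
--                     return min_num
--         min_num += 1
-- ===== SOURCE B (Python) =====
-- def solution(numbers):
--     m0 = min(numbers)
--
--     def gcd(a, b):
--         while b:
--             a, b = b, a % b
--         return a
--
--     def combs(k, lst):
--         if k == 0:
--             return [[]]
--         if len(lst) < k:
--             return []
--         rest = lst[1:]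
--         return [[lst[0]] + t for t in combs(k - 1, rest)] + combs(k, rest)
--
--     best = None
--     for triple in combs(3, numbers):
--         L = 1
--         for x in triple:
--             g = gcd(L, abs(x))
--             if g == 0:
--                 L = 0
--                 break
--             L = L // g * abs(x)
--         if L == 0:
--             continue
--         cand = -(-m0 // L) * L  # smallest multiple of L that is >= m0
--         if best is None or cand < best:
--             best = cand
--     return best
-- ===== Notes on version B (the rewrite author's own statement) =====
-- stated objective: alternative
-- what changed: A searches upward from min(numbers) testing every integer against all elements until one has three divisors; B instead takes the minimum, over every 3-element subsequence, of the smallest multiple of that triple's lcm that is >= min(numbers), a closed form with no unbounded search.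
-- outside the precondition, e.g. on solution([0, 1, 1, 1]): A raises ZeroDivisionError, B returns 0; on solution([1, 1, 1, 0]): A returns 0, B returns 0; on solution([7, 2]): A does not finish within the time limit, B returns None
import Mathlib
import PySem

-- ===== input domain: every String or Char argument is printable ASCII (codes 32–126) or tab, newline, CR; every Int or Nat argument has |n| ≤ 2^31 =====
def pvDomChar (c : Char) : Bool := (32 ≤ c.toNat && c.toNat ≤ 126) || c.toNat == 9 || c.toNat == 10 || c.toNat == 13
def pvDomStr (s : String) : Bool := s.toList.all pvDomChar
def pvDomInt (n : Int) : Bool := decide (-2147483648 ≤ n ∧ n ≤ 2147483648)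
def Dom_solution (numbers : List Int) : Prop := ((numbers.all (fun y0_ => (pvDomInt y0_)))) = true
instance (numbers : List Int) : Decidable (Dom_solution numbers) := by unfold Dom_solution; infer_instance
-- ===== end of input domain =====

-- B replaces A's unbounded linear search (try min, min+1, … and count divisors each time)
-- by a closed-form minimum over all 3-element subsequences: for each triple, the smallest
-- multiple of its lcm that is ≥ min(numbers); objective: alternative (asymptotic in the answer's distance).


-- ===== PORT A =====
-- the inner `for num in numbers` loop: counts divisors, returns True when cnt reaches 3
def innerScan (numbers : List Int) (m : Int) (cnt : Nat) : Bool :=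
  match numbers with
  | [] => false
  | num :: rest =>
      if PySem.Int.mod m num = 0 then
        if cnt + 1 = 3 then true else innerScan rest m (cnt + 1)
      else innerScan rest m cnt

-- the `while True` loop; fuel is only a termination guard (A's loop is unbounded); on
-- fuel exhaustion (never reached under Pre_) it returns the current candidate
def loopA (numbers : List Int) : Nat → Int → Int
  | 0, m => m
  | f + 1, m => if innerScan numbers m 0 then m else loopA numbers f (m + 1)

-- fuel guard: under Pre_ the first multiple of lcm(|n0|,|n1|,|n2|) at or above min(numbers)
-- has three divisors among numbers, so the loop returns within this many steps
def fuelA (numbers : List Int) (m0 : Int) : Nat :=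
  match numbers with
  | a :: b :: c :: _ =>
      let L : Nat := Nat.lcm (Nat.lcm a.natAbs b.natAbs) c.natAbs
      if L = 0 then 1 else ((-(PySem.Int.floordiv (-m0) (L : Int))) * (L : Int) - m0).toNat + 1
  | _ => 1

def solution (numbers : List Int) : Int :=
  match PySem.List.min? numbers (fun y => y) with
  | none => 0        -- min([]) raises ValueError: excluded by Pre_
  | some m0 => loopA numbers (fuelA numbers m0) m0

-- ===== PORT B =====
-- Source B's hand-written Euclid (while b: a, b = b, a % b)
def gcdB (a b : Int) : Int :=
  if _hb : b = 0 then a else gcdB b (PySem.Int.mod a b)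
termination_by b.natAbs
decreasing_by
  rcases lt_trichotomy b 0 with h | h | h
  · have := PySem.Int.mod_neg_bounds a h; omega
  · exact absurd h _hb
  · have h1 := PySem.Int.mod_nonneg a h; have h2 := PySem.Int.mod_lt a h; omega

-- Source B's recursive combinations: all k-element subsequences
def combsB : Nat → List Int → List (List Int)
  | 0, _ => [[]]
  | _ + 1, [] => []
  | k + 1, x :: rest =>
      if rest.length + 1 < k + 1 then []
      else ((combsB k rest).map (fun t => x :: t)) ++ combsB (k + 1) rest

-- Source B's `for x in triple` lcm accumulation (L = L // g * abs(x), break to 0 if g == 0)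
def lcmLoop : List Int → Int → Int
  | [], L => L
  | x :: rest, L =>
      let g := gcdB L (x.natAbs : Int)
      if g = 0 then 0
      else lcmLoop rest (PySem.Int.floordiv L g * (x.natAbs : Int))

-- Source B's `for triple in combs(3, numbers)` loop maintaining best
def bestLoop (m0 : Int) : List (List Int) → Option Int → Option Int
  | [], best => best
  | t :: ts, best =>
      let L := lcmLoop t 1
      if L = 0 then bestLoop m0 ts best
      else
        let cand := -(PySem.Int.floordiv (-m0) L) * L
        match best with
        | none => bestLoop m0 ts (some cand)
        | some b => bestLoop m0 ts (some (if cand < b then cand else b))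

def solution_alt (numbers : List Int) : Int :=
  match PySem.List.min? numbers (fun y => y) with
  | none => 0        -- min([]) raises: excluded by Pre_
  | some m0 =>
      match bestLoop m0 (combsB 3 numbers) none with
      | some b => b
      | none => 0    -- Source B returns None here (no valid triple): excluded by Pre_

-- ===== PRECONDITION & SPEC =====
-- Pre_ excludes lists with fewer than 3 elements (A loops forever, or raises ValueError on [])
-- and lists containing 0, on which A's behaviour is an accident of scan order: it usually
-- raises ZeroDivisionError on `min_num % 0`, returning only when three divisors happen to
-- precede the 0 in the scan.
def Pre_solution (numbers : List Int) : Prop :=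
  3 ≤ numbers.length ∧ (0 : Int) ∉ numbers
instance (numbers : List Int) : Decidable (Pre_solution numbers) := by
  unfold Pre_solution; infer_instance

def pvWitness_solution : List Int := [6, 10, 4, 15]

def Spec_solution (numbers : List Int) (out : Int) : Prop := out = solution_alt numbers
instance (numbers : List Int) (out : Int) : Decidable (Spec_solution numbers out) := by
  unfold Spec_solution; infer_instance

-- ===== CLAIM (what is proved, stated in full; the proofs are below) =====
def Claim_equal_solution : Prop :=
  ∀ (numbers : List Int), Dom_solution numbers → Pre_solution numbers →
    Spec_solution numbers (solution numbers)

-- ===== LEMMAS AND PROOFS =====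

-- the divisor predicate A's inner loop tests
def divP (m : Int) : Int → Bool := fun a => decide (PySem.Int.mod m a = 0)

-- A's inner scan returns true iff at least 3 elements divide m (for cnt ≤ 2)
theorem innerScan_iff (numbers : List Int) (m : Int) :
    ∀ cnt : Nat, cnt ≤ 2 →
      (innerScan numbers m cnt = true ↔ 3 ≤ cnt + numbers.countP (divP m)) := by
  induction numbers with
  | nil => intro cnt h; simp [innerScan]; omega
  | cons x rest ih =>
      intro cnt h
      by_cases hx : PySem.Int.mod m x = 0
      · have hcount : (x :: rest).countP (divP m) = rest.countP (divP m) + 1 := by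
          simp [divP, hx]
        by_cases h3 : cnt + 1 = 3
        · simp only [innerScan, hx, if_true, h3, if_true, hcount]
          constructor
          · intro _; omega
          · intro _; trivial
        · simp only [innerScan, hx, if_true, h3, if_false, hcount]
          rw [ih (cnt + 1) (by omega)]
          omega
      · have hcount : (x :: rest).countP (divP m) = rest.countP (divP m) := by
          simp [divP, hx]
        simp only [innerScan, hx, if_false, hcount]
        exact ih cnt h

-- membership in Source B's combinations = length-k subsequence
theorem mem_combsB (k : Nat) (l s : List Int) :
    s ∈ combsB k l ↔ s.length = k ∧ s.Sublist l := by
  induction l generalizing k s with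
  | nil =>
      cases k with
      | zero => simp [combsB, List.sublist_nil]
      | succ k =>
          simp only [combsB, List.not_mem_nil, false_iff]
          rintro ⟨hl, hs⟩
          have := List.sublist_nil.mp hs
          subst this; simp at hl
  | cons x rest ih =>
      cases k with
      | zero => simp [combsB, List.length_eq_zero_iff]; intro h; subst h; exact List.nil_sublist _
      | succ k =>
          simp only [combsB]
          by_cases hlen : rest.length + 1 < k + 1
          · simp only [hlen, if_true]
            constructor
            · intro h; exact absurd h (List.not_mem_nil)
            · rintro ⟨hl, hs⟩
              have := hs.length_le
              simp at this; omega
          · simp only [hlen, if_false, List.mem_append, List.mem_map]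
            rw [List.sublist_cons_iff]
            constructor
            · rintro (⟨t, ht, rfl⟩ | h)
              · rcases (ih k t).mp ht with ⟨hl, hs⟩
                exact ⟨by simp [hl], Or.inr ⟨t, rfl, hs⟩⟩
              · rcases (ih (k + 1) s).mp h with ⟨hl, hs⟩
                exact ⟨hl, Or.inl hs⟩
            · rintro ⟨hl, hs | ⟨r, rfl, hr⟩⟩
              · exact Or.inr ((ih (k + 1) s).mpr ⟨hl, hs⟩)
              · exact Or.inl ⟨r, (ih k r).mpr ⟨by simpa using hl, hr⟩, rfl⟩

-- countP ≥ 3 iff some 3-element subsequence is all divisors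
theorem countP_three_iff (l : List Int) (p : Int → Bool) :
    3 ≤ l.countP p ↔ ∃ s : List Int, s.length = 3 ∧ s.Sublist l ∧ ∀ x ∈ s, p x = true := by
  constructor
  · intro h
    refine ⟨(l.filter p).take 3, ?_, ?_, ?_⟩
    · rw [List.length_take]
      rw [List.countP_eq_length_filter] at h
      omega
    · exact (List.take_sublist 3 _).trans List.filter_sublist
    · intro x hx
      exact List.of_mem_filter (List.mem_of_mem_take hx)
  · rintro ⟨s, hl, hs, hp⟩
    calc 3 = s.countP p := by rw [List.countP_eq_length.mpr hp, hl]
    _ ≤ l.countP p := hs.countP_le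

-- gcdB is Nat.gcd on casts
theorem gcdB_natCast (m n : Nat) : gcdB (m : Int) (n : Int) = (Nat.gcd m n : Int) := by
  induction n using Nat.strong_induction_on generalizing m with
  | _ n ih =>
      rw [gcdB]
      by_cases hn : n = 0
      · simp [hn]
      · have hn' : ((n : Int)) ≠ 0 := by exact_mod_cast hn
        rw [dif_neg hn', PySem.Int.mod_natCast,
          ih (m % n) (Nat.mod_lt _ (Nat.pos_of_ne_zero hn)) n,
          Nat.gcd_comm n (m % n), ← Nat.gcd_rec, Nat.gcd_comm]

theorem div_gcd_mul_eq_lcm (m n : Nat) : m / Nat.gcd m n * n = Nat.lcm m n := by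
  rcases Nat.eq_zero_or_pos (Nat.gcd m n) with hg | hg
  · have hm := Nat.eq_zero_of_gcd_eq_zero_left hg
    simp [hm, Nat.lcm]
  · obtain ⟨t, ht⟩ := Nat.gcd_dvd_left m n
    rw [Nat.lcm]
    set g := Nat.gcd m n with hgdef
    rw [ht, Nat.mul_div_cancel_left t hg, Nat.mul_assoc, Nat.mul_div_cancel_left _ hg]

-- the reference lcm accumulator
def lcmNat (s : List Int) (L : Nat) : Nat := s.foldl (fun acc x => Nat.lcm acc x.natAbs) L

theorem lcmLoop_eq (s : List Int) (L : Nat) (hL : 0 < L) (hs : ∀ x ∈ s, x ≠ 0) :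
    lcmLoop s (L : Int) = (lcmNat s L : Int) := by
  induction s generalizing L with
  | nil => simp [lcmLoop, lcmNat]
  | cons x rest ih =>
      have hx : x ≠ 0 := hs x List.mem_cons_self
      have hxa : x.natAbs ≠ 0 := by simpa using hx
      have hg : Nat.gcd L x.natAbs ≠ 0 := by
        intro h; exact absurd (Nat.eq_zero_of_gcd_eq_zero_left h) (by omega)
      rw [lcmLoop]
      simp only [gcdB_natCast]
      have hg' : ((Nat.gcd L x.natAbs : Nat) : Int) ≠ 0 := by exact_mod_cast hg
      rw [if_neg hg']
      rw [PySem.Int.floordiv_natCast]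
      rw [show ((L / Nat.gcd L x.natAbs : Nat) : Int) * ((x.natAbs : Nat) : Int)
            = ((L / Nat.gcd L x.natAbs * x.natAbs : Nat) : Int) by push_cast; ring]
      rw [div_gcd_mul_eq_lcm]
      rw [ih _ (Nat.pos_of_ne_zero (Nat.lcm_ne_zero (by omega) hxa))
            (fun y hy => hs y (List.mem_cons_of_mem _ hy))]
      simp [lcmNat]

theorem lcmNat_pos (s : List Int) (L : Nat) (hL : 0 < L) (hs : ∀ x ∈ s, x ≠ 0) :
    0 < lcmNat s L := by
  induction s generalizing L with
  | nil => simpa [lcmNat] using hL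
  | cons x rest ih =>
      have hx : x.natAbs ≠ 0 := by simpa using hs x List.mem_cons_self
      exact ih _ (Nat.pos_of_ne_zero (Nat.lcm_ne_zero (by omega) hx))
        (fun y hy => hs y (List.mem_cons_of_mem _ hy))

theorem base_dvd_lcmNat (s : List Int) (L : Nat) : L ∣ lcmNat s L := by
  induction s generalizing L with
  | nil => simp [lcmNat]
  | cons x rest ih => exact (Nat.dvd_lcm_left L x.natAbs).trans (ih _)

theorem mem_dvd_lcmNat (s : List Int) :
    ∀ (L : Nat) (x : Int), x ∈ s → x.natAbs ∣ lcmNat s L := by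
  induction s with
  | nil => intro L x hx; cases hx
  | cons y rest ih =>
      intro L x hx
      rcases List.mem_cons.mp hx with rfl | h
      · exact (Nat.dvd_lcm_right L x.natAbs).trans (base_dvd_lcmNat rest _)
      · exact ih _ x h

theorem lcmNat_dvd (s : List Int) (L : Nat) (M : Nat) (hL : L ∣ M)
    (hs : ∀ x ∈ s, x.natAbs ∣ M) : lcmNat s L ∣ M := by
  induction s generalizing L with
  | nil => simpa [lcmNat] using hL
  | cons x rest ih =>
      exact ih _ (Nat.lcm_dvd hL (hs x List.mem_cons_self))
        (fun y hy => hs y (List.mem_cons_of_mem _ hy))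

-- the candidate value for lcm L: smallest multiple of L at or above m0
def candVal (m0 L : Int) : Int := -(PySem.Int.floordiv (-m0) L) * L

theorem candVal_spec (m0 L : Int) (hL : 0 < L) :
    m0 ≤ candVal m0 L ∧ L ∣ candVal m0 L ∧
    ∀ m : Int, m0 ≤ m → L ∣ m → candVal m0 L ≤ m := by
  set q := -(PySem.Int.floordiv (-m0) L) with hq
  have hbr := (PySem.Int.neg_floordiv_neg_eq_iff_of_pos (a := m0) (b := L) (q := q) hL).mp hq.symm
  refine ⟨by rw [candVal]; exact hbr.2, ⟨q, by rw [candVal]; ring⟩, ?_⟩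
  rintro m hm ⟨q', rfl⟩
  have : q - 1 < q' := by
    nlinarith [hbr.1, hm]
  have hqq : q ≤ q' := by omega
  calc candVal m0 (L) = q * L := rfl
  _ ≤ q' * L := by nlinarith
  _ = L * q' := by ring

-- bestLoop results: membership-style lower bound facts
theorem bestLoop_isSome (m0 : Int) (ts : List (List Int)) (b : Int) :
    ∃ r, bestLoop m0 ts (some b) = some r := by
  induction ts generalizing b with
  | nil => exact ⟨b, rfl⟩
  | cons t ts ih =>
      rw [bestLoop]
      by_cases h : lcmLoop t 1 = 0
      · simpa [h] using ih b
      · simpa [h] using ih _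

theorem bestLoop_mem (m0 : Int) (ts : List (List Int)) (best : Option Int) (r : Int)
    (h : bestLoop m0 ts best = some r) :
    best = some r ∨ ∃ t ∈ ts, lcmLoop t 1 ≠ 0 ∧ r = candVal m0 (lcmLoop t 1) := by
  induction ts generalizing best with
  | nil => exact Or.inl h
  | cons t ts ih =>
      rw [bestLoop] at h
      by_cases hL : lcmLoop t 1 = 0
      · simp only [hL, if_true] at h
        rcases ih _ h with h' | ⟨t', ht', h1, h2⟩
        · exact Or.inl h'
        · exact Or.inr ⟨t', List.mem_cons_of_mem _ ht', h1, h2⟩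
      · simp only [hL, if_false] at h
        cases best with
        | none =>
            rcases ih _ h with h' | ⟨t', ht', h1, h2⟩
            · exact Or.inr ⟨t, List.mem_cons_self, hL, (Option.some.inj h').symm⟩
            · exact Or.inr ⟨t', List.mem_cons_of_mem _ ht', h1, h2⟩
        | some b =>
            rcases ih _ h with h' | ⟨t', ht', h1, h2⟩
            · have hv := Option.some.inj h'
              by_cases hc : -(PySem.Int.floordiv (-m0) (lcmLoop t 1)) * lcmLoop t 1 < b
              · rw [if_pos hc] at hv
                exact Or.inr ⟨t, List.mem_cons_self, hL, hv.symm⟩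
              · rw [if_neg hc] at hv
                exact Or.inl (by rw [hv])
            · exact Or.inr ⟨t', List.mem_cons_of_mem _ ht', h1, h2⟩

theorem bestLoop_le_best (m0 : Int) (ts : List (List Int)) (b r : Int)
    (h : bestLoop m0 ts (some b) = some r) : r ≤ b := by
  induction ts generalizing b with
  | nil => simp [bestLoop] at h; omega
  | cons t ts ih =>
      rw [bestLoop] at h
      by_cases hL : lcmLoop t 1 = 0
      · simp only [hL, if_true] at h; exact ih _ h
      · simp only [hL, if_false] at h
        by_cases hc : -(PySem.Int.floordiv (-m0) (lcmLoop t 1)) * lcmLoop t 1 < b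
        · simp only [hc, if_true] at h
          have := ih _ h; omega
        · simp only [hc, if_false] at h
          exact ih _ h

theorem bestLoop_le (m0 : Int) (ts : List (List Int)) (best : Option Int) (r : Int)
    (h : bestLoop m0 ts best = some r) :
    ∀ t ∈ ts, lcmLoop t 1 ≠ 0 → r ≤ candVal m0 (lcmLoop t 1) := by
  induction ts generalizing best with
  | nil => intro t ht; cases ht
  | cons t0 ts ih =>
      intro t ht hL
      rcases List.mem_cons.mp ht with rfl | hmem
      · rw [bestLoop] at h
        simp only [hL, if_false] at h
        cases best with
        | none => exact bestLoop_le_best m0 ts _ r h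
        | some b =>
            have hb := bestLoop_le_best m0 ts _ r h
            simp only [candVal]
            by_cases hc : -(PySem.Int.floordiv (-m0) (lcmLoop t 1)) * lcmLoop t 1 < b
            · rw [if_pos hc] at hb; exact hb
            · rw [if_neg hc] at hb; exact hb.trans (not_lt.mp hc)
      · rw [bestLoop] at h
        by_cases hL0 : lcmLoop t0 1 = 0
        · simp only [hL0, if_true] at h; exact ih _ h t hmem hL
        · simp only [hL0, if_false] at h
          cases best with
          | none => exact ih _ h t hmem hL
          | some b => exact ih _ h t hmem hL

-- A's loop returns r, the least good value at or above base, once fuel covers the distance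
theorem loopA_eq (numbers : List Int) (base r : Int)
    (hr : innerScan numbers r 0 = true)
    (hmin : ∀ x : Int, base ≤ x → x < r → innerScan numbers x 0 = false) :
    ∀ (f : Nat) (m : Int), base ≤ m → m ≤ r → (r - m).toNat < f → loopA numbers f m = r := by
  intro f
  induction f with
  | zero => intro m _ _ h; omega
  | succ f ih =>
      intro m hbase hm hf
      rw [loopA]
      by_cases hgood : innerScan numbers m 0 = true
      · have : ¬ m < r := fun h => by rw [hmin m hbase h] at hgood; cases hgood
        have heq : m = r := by omega
        subst heq
        simp [hgood]
      · have hne : m ≠ r := fun h => hgood (h ▸ hr)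
        have hmr : m < r := by omega
        rw [eq_false_of_ne_true hgood, if_neg (by simp)]
        exact ih (m + 1) (by omega) (by omega) (by omega)

theorem bestLoop_some (m0 : Int) (t : List Int) (hL : lcmLoop t 1 ≠ 0) :
    ∀ (ts : List (List Int)) (best : Option Int), t ∈ ts →
      ∃ r, bestLoop m0 ts best = some r := by
  intro ts
  induction ts with
  | nil => intro best ht; cases ht
  | cons t0 ts ih =>
      intro best ht
      rw [bestLoop]
      by_cases h0 : lcmLoop t0 1 = 0
      · simp only [h0, if_true]
        rcases List.mem_cons.mp ht with rfl | h
        · exact absurd h0 hL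
        · exact ih best h
      · simp only [h0, if_false]
        cases best with
        | none => exact bestLoop_isSome m0 ts _
        | some b => exact bestLoop_isSome m0 ts _

-- bundled: "m is divisible by at least three elements"
theorem good_iff (numbers : List Int) (_hnz : (0:Int) ∉ numbers) (m : Int) :
    innerScan numbers m 0 = true ↔
      ∃ s : List Int, s.length = 3 ∧ s.Sublist numbers ∧ ∀ x ∈ s, x ∣ m := by
  rw [innerScan_iff numbers m 0 (by omega)]
  simp only [Nat.zero_add]
  rw [countP_three_iff]
  constructor
  · rintro ⟨s, h1, h2, h3⟩
    refine ⟨s, h1, h2, fun x hx => ?_⟩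
    have := h3 x hx
    simp only [divP, decide_eq_true_eq] at this
    exact (PySem.Int.mod_eq_zero_iff_dvd m x).mp this
  · rintro ⟨s, h1, h2, h3⟩
    refine ⟨s, h1, h2, fun x hx => ?_⟩
    simp only [divP, decide_eq_true_eq]
    exact (PySem.Int.mod_eq_zero_iff_dvd m x).mpr (h3 x hx)

-- elements of a sublist triple divide its candidate; the candidate is good and ≥ m0
theorem triple_cand_good (numbers : List Int) (hnz : (0:Int) ∉ numbers)
    (t : List Int) (_ht3 : t.length = 3) (hts : t.Sublist numbers) (m0 : Int) :
    lcmLoop t 1 ≠ 0 ∧ 0 < lcmLoop t 1 ∧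
    m0 ≤ candVal m0 (lcmLoop t 1) ∧ (∀ x ∈ t, x ∣ candVal m0 (lcmLoop t 1)) ∧
    (∀ m : Int, m0 ≤ m → (∀ x ∈ t, x ∣ m) → candVal m0 (lcmLoop t 1) ≤ m) := by
  have hnz' : ∀ x ∈ t, x ≠ 0 := fun x hx h0 => hnz (h0 ▸ hts.mem hx)
  have heq : lcmLoop t 1 = (lcmNat t 1 : Int) := by
    have := lcmLoop_eq t 1 (by omega) hnz'
    simpa using this
  have hpos : 0 < lcmNat t 1 := lcmNat_pos t 1 (by omega) hnz'
  have hposI : 0 < lcmLoop t 1 := by rw [heq]; exact_mod_cast hpos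
  rcases candVal_spec m0 (lcmLoop t 1) hposI with ⟨h1, h2, h3⟩
  refine ⟨by omega, hposI, h1, ?_, ?_⟩
  · intro x hx
    have hd : x.natAbs ∣ lcmNat t 1 := mem_dvd_lcmNat t 1 x hx
    have : x ∣ lcmLoop t 1 := by
      rw [heq]; exact Int.natAbs_dvd.mp (Int.ofNat_dvd_right.mpr hd)
    exact this.trans h2
  · intro m hm hdvd
    apply h3 m hm
    have : (lcmNat t 1 : Int) ∣ m :=
      Int.ofNat_dvd_left.mpr
        (lcmNat_dvd t 1 m.natAbs (Nat.one_dvd _)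
          (fun x hx => Int.natAbs_dvd_natAbs.mpr (hdvd x hx)))
    rw [heq]; exact this

-- under Pre_, solution_alt returns the least value ≥ min that three elements divide
theorem alt_characterization (numbers : List Int) (m0 : Int) (hnz : (0:Int) ∉ numbers)
    (r : Int) (hb : bestLoop m0 (combsB 3 numbers) none = some r) :
    m0 ≤ r ∧ innerScan numbers r 0 = true ∧
      ∀ m : Int, m0 ≤ m → innerScan numbers m 0 = true → r ≤ m := by
  rcases bestLoop_mem m0 _ _ r hb with h' | ⟨t, ht, hL, rfl⟩
  · cases h'
  · obtain ⟨ht3, hts⟩ := (mem_combsB 3 numbers t).mp ht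
    obtain ⟨_, _, hge, hdvd, _⟩ := triple_cand_good numbers hnz t ht3 hts m0
    refine ⟨hge, (good_iff numbers hnz _).mpr ⟨t, ht3, hts, hdvd⟩, ?_⟩
    intro m hm hgood
    obtain ⟨s, hs3, hss, hsd⟩ := (good_iff numbers hnz m).mp hgood
    obtain ⟨hL', _, _, _, hmin⟩ := triple_cand_good numbers hnz s hs3 hss m0
    have hsmem : s ∈ combsB 3 numbers := (mem_combsB 3 numbers s).mpr ⟨hs3, hss⟩
    exact (bestLoop_le m0 _ _ _ hb s hsmem hL').trans (hmin m hm hsd)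

-- ===== VERDICT (by name: the statement is the Claim_ definition above) =====
theorem solution_spec : Claim_equal_solution := by
  intro numbers _hdom hpre
  obtain ⟨hlen, hnz⟩ := hpre
  unfold Spec_solution
  rcases hnum : numbers with _ | ⟨a, _ | ⟨b, _ | ⟨c, rest⟩⟩⟩ <;> subst hnum <;> simp at hlen
  set numbers := a :: b :: c :: rest with hnum
  -- the minimum
  obtain ⟨m0, hm0⟩ : ∃ m0, PySem.List.min? numbers (fun y => y) = some m0 := by
    cases h : PySem.List.min? numbers (fun y => y) with
    | none => exact absurd ((PySem.List.min?_eq_none_iff _ _).mp h) (by simp [hnum])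
    | some m0 => exact ⟨m0, rfl⟩
  -- the first-three triple and its candidate
  have ha : a ≠ 0 := fun h => hnz (h ▸ List.mem_cons_self)
  have hb0 : b ≠ 0 := fun h => hnz (h ▸ List.mem_cons_of_mem _ List.mem_cons_self)
  have hc : c ≠ 0 := fun h =>
    hnz (h ▸ List.mem_cons_of_mem _ (List.mem_cons_of_mem _ List.mem_cons_self))
  have ht0s : ([a, b, c] : List Int).Sublist numbers := by
    simp [hnum, List.cons_sublist_cons]
  have ht03 : ([a, b, c] : List Int).length = 3 := rfl
  obtain ⟨hL0, hL0pos, hTge, hTdvd, _⟩ :=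
    triple_cand_good numbers hnz [a, b, c] ht03 ht0s m0
  have hTgood : innerScan numbers (candVal m0 (lcmLoop [a, b, c] 1)) 0 = true :=
    (good_iff numbers hnz _).mpr ⟨[a, b, c], ht03, ht0s, hTdvd⟩
  -- B returns some r
  obtain ⟨r, hbr⟩ :=
    bestLoop_some m0 [a, b, c] hL0 (combsB 3 numbers) none
      ((mem_combsB 3 numbers [a, b, c]).mpr ⟨ht03, ht0s⟩)
  obtain ⟨hrge, hrgood, hrmin⟩ := alt_characterization numbers m0 hnz r hbr
  -- the fuel value: lcmLoop [a,b,c] 1 is exactly fuelA's lcm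
  have hlcm : lcmLoop ([a, b, c] : List Int) 1 =
      ((Nat.lcm (Nat.lcm a.natAbs b.natAbs) c.natAbs : Nat) : Int) := by
    have := lcmLoop_eq [a, b, c] 1 (by omega)
      (by
        intro x hx
        rcases List.mem_cons.mp hx with rfl | hx
        · exact ha
        rcases List.mem_cons.mp hx with rfl | hx
        · exact hb0
        rcases List.mem_cons.mp hx with rfl | hx
        · exact hc
        cases hx)
    simp only [Nat.cast_one] at this
    rw [this]
    simp [lcmNat, Nat.lcm_one_left]
  have hLne : Nat.lcm (Nat.lcm a.natAbs b.natAbs) c.natAbs ≠ 0 := by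
    intro h; apply hL0; rw [hlcm, h]; simp
  have hrT : r ≤ candVal m0 (lcmLoop [a, b, c] 1) := hrmin _ hTge hTgood
  -- compute both sides
  rw [solution, solution_alt, hm0]
  dsimp only
  rw [hbr]
  dsimp only
  rw [show fuelA numbers m0 =
      ((candVal m0 (lcmLoop [a, b, c] 1)) - m0).toNat + 1 by
    rw [fuelA.eq_def]
    simp only [hnum]
    rw [if_neg hLne]
    rw [candVal, hlcm]]
  exact loopA_eq numbers m0 r hrgood
    (fun x hx hxr => by
      cases h : innerScan numbers x 0 with
      | false => rfl
      | true => exact absurd (hrmin x hx h) (by omega))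
    _ m0 le_rfl hrge (by omega)
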